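-- pv_equiv track=rewrite | github.com/RameshAditya/competitive-programming | Competitions/AUG17/WALKBT2.py | extractnodesfrombinary
-- ===== SOURCE A (Python) =====
-- def extractnodesfrombinary(x,n):
--     binary=bin(x)[2:]
--     cur=0
--     ans=[0]
--     binary='0'*(n-len(binary))+binary
--     for j in range(n):
--         if binary[j]=='0':
--             ans.append(2*cur+1)
--             cur=2*cur+1
--         else:
--             ans.append(2*cur+2)
--             cur=2*cur+2
--     return ans
-- ===== SOURCE B (Python) =====
-- def extractnodesfrombinary(x, n):
--     L = max(n, x.bit_length())
--     return [0] + [(1 << j) - 1 + (x >> (L - j)) for j in range(1, n + 1)]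
-- ===== Notes on version B (the rewrite author's own statement) =====
-- stated objective: simpler
-- what changed: Replaces the binary-string construction, zero-padding and the per-character loop maintaining a running accumulator cur with a direct closed-form comprehension: node at depth j is (1<<j)-1 plus the top j bits of x obtained by a right shift.
-- outside the precondition, e.g. on extractnodesfrombinary(-2, 2): A returns [0, 2, 6], B returns [0, 0, 1]
import Mathlib
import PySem

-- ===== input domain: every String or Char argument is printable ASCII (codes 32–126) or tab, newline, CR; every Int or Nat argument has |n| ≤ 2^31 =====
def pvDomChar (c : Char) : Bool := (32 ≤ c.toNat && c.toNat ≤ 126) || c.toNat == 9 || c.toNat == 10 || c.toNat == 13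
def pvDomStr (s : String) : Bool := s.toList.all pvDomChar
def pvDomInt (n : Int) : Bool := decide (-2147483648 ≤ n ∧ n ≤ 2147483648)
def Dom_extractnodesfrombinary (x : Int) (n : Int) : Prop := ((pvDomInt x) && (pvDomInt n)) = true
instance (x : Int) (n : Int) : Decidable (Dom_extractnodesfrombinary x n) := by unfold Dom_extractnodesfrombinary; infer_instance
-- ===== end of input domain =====

-- B replaces A's binary-string walk with a closed-form comprehension (node at depth j is
-- (1<<j)-1 plus the top j bits of x); proved equal to A for all n whenever x ≥ 0.

-- ===== PORT A =====
-- bin(m) for m : Nat, without the '0b' prefix: binary digits MSB first, binDigitsA 0 = ['0'].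
-- Hand-ported recursion; exact for Python's bin on naturals.
def binDigitsA (m : Nat) : List Char :=
  if _h : m < 2 then [if m = 1 then '1' else '0']
  else binDigitsA (m / 2) ++ [if m % 2 = 1 then '1' else '0']
decreasing_by exact Nat.div_lt_self (by omega) (by omega)

-- loop body of A, extracted as a helper (c is the character binary[j])
def stepA (st : Int × List Int) (c : Char) : Int × List Int :=
  if c = '0' then (2*st.1+1, st.2 ++ [2*st.1+1]) else (2*st.1+2, st.2 ++ [2*st.1+2])

def extractnodesfrombinary (x : Int) (n : Int) : List Int :=
  -- binary = bin(x)[2:] : for x < 0 Python's bin gives '-0b…', so [2:] keeps a leading 'b'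
  let binary : List Char := if x < 0 then 'b' :: binDigitsA x.natAbs else binDigitsA x.toNat
  -- binary = '0'*(n-len(binary)) + binary  ('0'*k is '' for k ≤ 0, which .toNat gives exactly)
  let binary : List Char := List.replicate (n - PySem.List.len binary).toNat '0' ++ binary
  -- binary[j] for j in range(n): always in range since len(binary) ≥ n, so the default is unreachable
  let r := (PySem.List.pyRange 0 n 1).foldl
    (fun st j => stepA st (PySem.List.pyGetD binary j '0')) (0, [0])
  r.2

-- ===== PORT B =====
def extractnodesfrombinary_alt (x : Int) (n : Int) : List Int :=
  -- L = max(n, x.bit_length())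
  let L : Int := max n (PySem.Int.bitLength x : Int)
  -- [0] + [(1 << j) - 1 + (x >> (L - j)) for j in range(1, n+1)]
  -- Python's Int shifts are core's <<< / >>> with a Nat shift amount; on range(1, n+1)
  -- we have 1 ≤ j ≤ n ≤ L, so j ≥ 0 and L - j ≥ 0 and .toNat is exact.
  0 :: (PySem.List.pyRange 1 (n+1) 1).map
    (fun j => ((1 : Int) <<< j.toNat) - 1 + (x >>> (L - j).toNat))

-- ===== PRECONDITION & SPEC =====
-- Pre_ restricts to the function's natural domain x ≥ 0: on negative x, A slices bin(x) = '-0b…'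
-- to a garbage string 'b…' and walks it char-by-char, while B's shifts are arithmetic.
def Pre_extractnodesfrombinary (x : Int) (n : Int) : Prop := 0 ≤ x
instance (x : Int) (n : Int) : Decidable (Pre_extractnodesfrombinary x n) := by
  unfold Pre_extractnodesfrombinary; infer_instance

def pvWitness_extractnodesfrombinary : Int × Int := (13, 5)

def Spec_extractnodesfrombinary (x : Int) (n : Int) (out : List Int) : Prop := out = extractnodesfrombinary_alt x n
instance (x : Int) (n : Int) (out : List Int) : Decidable (Spec_extractnodesfrombinary x n out) := by unfold Spec_extractnodesfrombinary; infer_instance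

-- ===== CLAIM (what is proved, stated in full; the proofs are below) =====
def Claim_equal_extractnodesfrombinary : Prop := ∀ (x : Int) (n : Int), Dom_extractnodesfrombinary x n → Pre_extractnodesfrombinary x n → Spec_extractnodesfrombinary x n (extractnodesfrombinary x n)

-- ===== LEMMAS AND PROOFS =====

-- the bit A reads from a character, and the value of a bit string (MSB first)
def bitN (c : Char) : Nat := if c = '0' then 0 else 1
def valN (cs : List Char) : Nat := cs.foldl (fun a c => 2*a + bitN c) 0

lemma bitN_le (c : Char) : bitN c ≤ 1 := by unfold bitN; split <;> omega

lemma valN_foldl : ∀ (cs : List Char) (a : Nat),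
    cs.foldl (fun a c => 2*a + bitN c) a = a * 2^cs.length + valN cs
  | [], a => by simp [valN]
  | c :: cs, a => by
    simp only [List.foldl_cons, List.length_cons, valN]
    rw [valN_foldl cs (2*a + bitN c), valN_foldl cs (2*0 + bitN c)]
    ring

lemma valN_cons (c : Char) (cs : List Char) :
    valN (c :: cs) = bitN c * 2^cs.length + valN cs := by
  show (c :: cs).foldl (fun a c => 2*a + bitN c) 0 = _
  rw [List.foldl_cons, valN_foldl]
  ring_nf

lemma valN_lt : ∀ (cs : List Char), valN cs < 2^cs.length
  | [] => by simp [valN]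
  | c :: cs => by
    have h1 := valN_lt cs
    have h2 := bitN_le c
    rw [valN_cons, List.length_cons, pow_succ]
    nlinarith

lemma valN_append (s t : List Char) :
    valN (s ++ t) = valN s * 2^t.length + valN t := by
  show (s ++ t).foldl _ 0 = _
  rw [List.foldl_append, valN_foldl]
  rfl

lemma valN_replicate_zero (k : Nat) (s : List Char) :
    valN (List.replicate k '0' ++ s) = valN s := by
  rw [valN_append]
  have : valN (List.replicate k '0') = 0 := by
    induction k with
    | zero => simp [valN]
    | succ k ih => rw [List.replicate_succ, valN_cons, ih]; simp [bitN]
  rw [this]; ring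

lemma valN_binDigitsA : ∀ (m : Nat), valN (binDigitsA m) = m := by
  intro m
  induction m using Nat.strong_induction_on with
  | _ m ih =>
    rw [binDigitsA]
    split
    · interval_cases m <;> decide
    · rename_i h
      rw [valN_append, ih (m / 2) (Nat.div_lt_self (by omega) (by omega))]
      have hv : valN [if m % 2 = 1 then '1' else '0'] = m % 2 := by
        split <;> simp_all [valN, bitN]
      rw [hv]
      simp only [List.length_cons, List.length_nil]
      omega

lemma len_binDigitsA : ∀ (m : Nat),
    (binDigitsA m).length = if m = 0 then 1 else PySem.Int.bitLength (m : Int) := by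
  intro m
  induction m using Nat.strong_induction_on with
  | _ m ih =>
    rw [binDigitsA]
    split
    · interval_cases m <;> decide
    · rename_i h
      rw [List.length_append, ih (m / 2) (Nat.div_lt_self (by omega) (by omega))]
      rw [PySem.Int.bitLength_natCast (m := m) (by omega)]
      have : ¬ (m / 2 = 0) := by omega
      simp [this, show ¬ (m = 0) by omega]

lemma valN_take_eq_div (p : List Char) (k : Nat) (_hk : k ≤ p.length) :
    valN (p.take k) = valN p / 2^(p.length - k) := by
  have h1 : valN p = valN (p.take k) * 2^(p.length - k) + valN (p.drop k) := by
    conv_lhs => rw [← List.take_append_drop k p]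
    rw [valN_append, List.length_drop]
  have h2 : valN (p.drop k) < 2^(p.length - k) := by
    have := valN_lt (p.drop k)
    rwa [List.length_drop] at this
  rw [h1, mul_comm, Nat.mul_add_div (by positivity), Nat.div_eq_of_lt h2]
  omega

-- the loop of A, characterised in closed form
lemma loopA : ∀ (cs : List Char) (cur : Int) (ans : List Int),
    cs.foldl stepA (cur, ans) =
      ((cur+1) * 2^cs.length - 1 + (valN cs : Int),
       ans ++ (List.range cs.length).map
         (fun i => (cur+1) * 2^(i+1) - 1 + (valN (cs.take (i+1)) : Int)))
  | [], cur, ans => by simp [valN]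
  | c :: cs, cur, ans => by
    have hstep : stepA (cur, ans) c = (2*cur+1+(bitN c : Int), ans ++ [2*cur+1+(bitN c : Int)]) := by
      simp only [stepA, bitN]; split_ifs <;> norm_num [Prod.ext_iff] <;> omega
    rw [List.foldl_cons, hstep, loopA cs (2*cur+1+(bitN c : Int)) _]
    refine Prod.ext ?_ ?_
    · show (2*cur+1+(bitN c : Int)+1) * 2^cs.length - 1 + (valN cs : Int)
        = (cur+1) * 2^(c :: cs).length - 1 + (valN (c :: cs) : Int)
      rw [valN_cons, List.length_cons]
      push_cast
      ring
    · show (ans ++ [2*cur+1+(bitN c : Int)]) ++ _ = ans ++ _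
      rw [List.append_assoc, List.singleton_append, List.length_cons,
        List.range_succ_eq_map, List.map_cons, List.map_map]
      congr 1
      congr 1
      · simp [valN, bitN]; omega
      · refine List.map_congr_left (fun i hi => ?_)
        rw [List.mem_range] at hi
        show (2*cur+1+(bitN c : Int)+1) * 2^(i+1) - 1 + (valN (cs.take (i+1)) : Int)
          = (cur+1) * 2^(i+1+1) - 1 + (valN ((c :: cs).take (i+1+1)) : Int)
        rw [List.take_succ_cons, valN_cons,
          List.length_take, Nat.min_eq_left (by omega)]
        push_cast
        ring

-- Int shift-right of a natural number is Nat division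
lemma natCast_shiftRight (m t : Nat) : (m : Int) >>> t = ((m / 2^t : Nat) : Int) := by
  simp [Int.shiftRight_eq_div_pow]

-- ===== VERDICT (by name: the statement is the Claim_ definition above) =====
theorem extractnodesfrombinary_spec : Claim_equal_extractnodesfrombinary := by
  intro x n _ hpre
  unfold Spec_extractnodesfrombinary extractnodesfrombinary extractnodesfrombinary_alt
  unfold Pre_extractnodesfrombinary at hpre
  by_cases hn : n ≤ 0
  · rw [PySem.List.pyRange_one_eq_nil hn, PySem.List.pyRange_one_eq_nil (by omega)]
    simp
  -- main case: x ≥ 0, n ≥ 1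
  have hxneg : ¬ x < 0 := by omega
  simp only [hxneg, if_false]
  set m : Nat := x.toNat with hm
  have hx : x = (m : Int) := by omega
  set N : Nat := n.toNat with hNdef
  have hN : n = (N : Int) := by omega
  have hN1 : 1 ≤ N := by omega
  set s : List Char := binDigitsA m with hs
  set p : List Char := List.replicate (n - PySem.List.len s).toNat '0' ++ s with hp
  have hslen : s.length = if m = 0 then 1 else PySem.Int.bitLength (m : Int) := len_binDigitsA m
  have hplen : p.length = max N s.length := by
    rw [hp, List.length_append, List.length_replicate, PySem.List.len_eq]
    omega
  have hNp : N ≤ p.length := by omega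
  -- A's indexed loop over range(n) is the structural fold over the first N characters of p
  have hcongr : ∀ (st : Int × List Int), ∀ j ∈ PySem.List.pyRange 0 n 1,
      stepA st (PySem.List.pyGetD p j '0') = stepA st (PySem.List.pyGetD (p.take N) j '0') := by
    intro st j hj
    rw [PySem.List.mem_pyRange_one] at hj
    obtain ⟨h0, h1⟩ := hj
    have hj' : j = ((j.toNat : Nat) : Int) := by omega
    have hjN : j.toNat < N := by omega
    rw [hj', PySem.List.pyGetD_natCast, PySem.List.pyGetD_natCast,
      List.getD_eq_getElem?_getD, List.getD_eq_getElem?_getD,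
      List.getElem?_take_of_lt hjN]
  rw [PySem.List.foldl_congr_mem _ _ _ _ hcongr]
  have htlen : (p.take N).length = N := by rw [List.length_take]; omega
  have hrange : PySem.List.pyRange 0 n 1 = PySem.List.pyRange 0 ((p.take N).length : Int) 1 := by
    rw [htlen, hN]
  rw [hrange, PySem.List.foldl_pyRange_zero_pyGetD' (p.take N) '0' stepA (0, [0]), loopA]
  -- both sides are now explicit lists over List.range N
  simp only [htlen]
  rw [PySem.List.pyRange_one]
  have hsub : (n + 1 - 1).toNat = N := by omega
  rw [hsub, List.map_map]
  show (0 : Int) :: _ = (0 : Int) :: _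
  congr 1
  refine List.map_congr_left (fun i hi => ?_)
  rw [List.mem_range] at hi
  simp only [Function.comp_apply]
  -- left node value
  rw [List.take_take, Nat.min_eq_left (by omega)]
  -- right node value: rewrite the shift amounts, then both sides are the same closed form
  have ht1 : ((1 : Int) + (i : Int)).toNat = i + 1 := by omega
  have hLp : (max n ((PySem.Int.bitLength x : Nat) : Int) - ((1 : Int) + (i : Int))).toNat
      = p.length - (i + 1) := by
    have hbl : (PySem.Int.bitLength x : Int) = (PySem.Int.bitLength (m : Int) : Int) := by rw [hx]
    rw [hbl, hplen, hslen]
    by_cases hm0 : m = 0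
    · have h0 : PySem.Int.bitLength ((0 : Nat) : Int) = 0 := by decide
      simp only [hm0, if_true, h0]
      omega
    · simp only [hm0, if_false]
      omega
  have hvalp : valN p = m := by
    rw [hp, valN_replicate_zero, hs, valN_binDigitsA]
  rw [ht1, hLp, hx, natCast_shiftRight, Int.one_shiftLeft,
    valN_take_eq_div p (i+1) (by omega), hvalp]
  push_cast
  ring
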